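-- pv_equiv track=rewrite | github.com/EverydaySolve/Programmers | kimssumin/Q27.py | solution
-- ===== SOURCE A (Python) =====
-- def solution(progresses, speeds):
--     answer = []
--     remain_day = []
--     for idx in range(len(progresses)):
--         if (100 - progresses[idx]) % speeds[idx] == 0:
--             day = (100 - progresses[idx]) // speeds[idx]
--             remain_day.append(day)
--         else:
--             day = (100 - progresses[idx]) // speeds[idx] + 1
--             remain_day.append(day)
--     base_idx = 0
--     for i in range(len(remain_day)):
--         if remain_day[base_idx] < remain_day[i]:
--              # 둘의 차이 = 배포 개수
--             answer.append(i - base_idx)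
--             base_idx  = i
--
--     answer.append(len(remain_day) - base_idx)
--
--     return answer
-- ===== SOURCE B (Python) =====
-- def solution(progresses, speeds):
--     # each task actually ships on the prefix maximum of the integer-ceil remaining days
--     ship_days = []
--     for p, s in zip(progresses, speeds):
--         d = -(-(100 - p) // s)
--         ship_days.append(d if not ship_days or d > ship_days[-1] else ship_days[-1])
--     # the answer is the run-length encoding of the nondecreasing ship-day list
--     answer = []
--     prev = None
--     for d in ship_days:
--         if prev == d:
--             answer[-1] += 1
--         else:
--             answer.append(1)
--             prev = d
--     return answer
-- ===== Notes on version B (the rewrite author's own statement) =====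
-- stated objective: alternative
-- what changed: B computes each task's actual ship day as the prefix maximum of the integer-ceil remaining days and then run-length encodes that nondecreasing list, instead of A's leader-index boundary scan that appends i-base_idx differences plus an unconditional tail append.
-- intended difference: On empty progresses A returns [0] (its unconditional final append counts a phantom deployment of zero tasks) while B returns [], the intended answer when there is nothing to deploy. — e.g. on solution([], []): A returns [0], B returns []
import Mathlib
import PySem

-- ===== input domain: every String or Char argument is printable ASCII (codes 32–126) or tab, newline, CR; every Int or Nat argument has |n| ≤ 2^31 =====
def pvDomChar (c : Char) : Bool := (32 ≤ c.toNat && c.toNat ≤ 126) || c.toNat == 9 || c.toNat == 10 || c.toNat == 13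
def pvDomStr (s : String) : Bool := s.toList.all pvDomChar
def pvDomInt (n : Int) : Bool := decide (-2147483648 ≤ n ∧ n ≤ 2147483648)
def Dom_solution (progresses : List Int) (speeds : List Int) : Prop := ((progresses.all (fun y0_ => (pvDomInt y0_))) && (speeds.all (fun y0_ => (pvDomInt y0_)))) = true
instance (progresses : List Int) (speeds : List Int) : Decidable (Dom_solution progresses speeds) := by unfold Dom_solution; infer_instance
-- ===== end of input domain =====

-- B computes each task's ship day as the prefix maximum of the ceil'd remaining days and run-length encodes that list (alternative algorithm); on empty input B returns [] where A returns [0] (D_ below).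

-- ===== PORT A =====
def solution (progresses : List Int) (speeds : List Int) : List Int :=
  let remain_day := (List.range progresses.length).foldl
    (fun remain_day idx =>
      if PySem.Int.mod (100 - progresses.getD idx 0) (speeds.getD idx 0) = 0 then
        remain_day ++ [PySem.Int.floordiv (100 - progresses.getD idx 0) (speeds.getD idx 0)]
      else
        remain_day ++ [PySem.Int.floordiv (100 - progresses.getD idx 0) (speeds.getD idx 0) + 1]) []
  let st := (List.range remain_day.length).foldl
    (fun (st : List Int × Nat) i =>
      if remain_day.getD st.2 0 < remain_day.getD i 0 then
        (st.1 ++ [(i : Int) - (st.2 : Int)], i)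
      else st) (([] : List Int), 0)
  st.1 ++ [(remain_day.length : Int) - (st.2 : Int)]

-- ===== PORT B =====
def solution_alt (progresses : List Int) (speeds : List Int) : List Int :=
  -- stage 1: ship_days[i] = prefix maximum so far of the integer-ceil remaining days
  let ship_days := (progresses.zip speeds).foldl
    (fun ship_days ps =>
      let d := -(PySem.Int.floordiv (-(100 - ps.1)) ps.2)
      ship_days ++ [if ship_days.isEmpty ∨ d > ship_days.getLastD 0 then d
                    else ship_days.getLastD 0]) []
  -- stage 2: run-length encode the equal runs of ship_days (prev = None ↦ none)
  let st := ship_days.foldl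
    (fun (st : List Int × Option Int) d =>
      if st.2 = some d then (st.1.dropLast ++ [st.1.getLastD 0 + 1], st.2)
      else (st.1 ++ [(1 : Int)], some d)) (([] : List Int), (none : Option Int))
  st.1

-- ===== PRECONDITION & SPEC =====
-- Pre_ excludes exactly where A raises: progresses longer than speeds (IndexError) or a zero speed among the used ones (ZeroDivisionError).
def Pre_solution (progresses : List Int) (speeds : List Int) : Prop :=
  progresses.length ≤ speeds.length ∧ ∀ t ∈ speeds.take progresses.length, t ≠ 0

instance (progresses : List Int) (speeds : List Int) : Decidable (Pre_solution progresses speeds) := by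
  unfold Pre_solution; infer_instance

def pvWitness_solution : List Int × List Int := ([30, 95, 90], [5, 4, 1])

-- On empty progresses A returns [0] (its unconditional final append counts a phantom deployment of zero tasks) while B returns [], the intended answer when there is nothing to deploy.
def D_solution (progresses : List Int) (speeds : List Int) : Prop := progresses = []

instance (progresses : List Int) (speeds : List Int) : Decidable (D_solution progresses speeds) := by
  unfold D_solution; infer_instance

def Spec_solution (progresses : List Int) (speeds : List Int) (out : List Int) : Prop :=
  ¬ D_solution progresses speeds → out = solution_alt progresses speeds

instance (progresses : List Int) (speeds : List Int) (out : List Int) : Decidable (Spec_solution progresses speeds out) := by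
  unfold Spec_solution; infer_instance

def pvDiffWitness_solution : List Int × List Int := ([], [])
def pvDiffWitnessOut_solution : (List Int) × (List Int) := ([0], [])

-- ===== CLAIM (what is proved, stated in full; the proofs are below) =====
def Claim_unchanged_solution : Prop := ∀ (progresses : List Int) (speeds : List Int), Dom_solution progresses speeds → Pre_solution progresses speeds → Spec_solution progresses speeds (solution progresses speeds)

def Claim_changed_solution : Prop := Dom_solution (pvDiffWitness_solution.1) (pvDiffWitness_solution.2) ∧ Pre_solution (pvDiffWitness_solution.1) (pvDiffWitness_solution.2) ∧ D_solution (pvDiffWitness_solution.1) (pvDiffWitness_solution.2) ∧ solution (pvDiffWitness_solution.1) (pvDiffWitness_solution.2) = pvDiffWitnessOut_solution.1 ∧ solution_alt (pvDiffWitness_solution.1) (pvDiffWitness_solution.2) = pvDiffWitnessOut_solution.2 ∧ pvDiffWitnessOut_solution.1 ≠ pvDiffWitnessOut_solution.2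

def Claim_exact_solution : Prop := ∀ (progresses : List Int) (speeds : List Int), Dom_solution progresses speeds → Pre_solution progresses speeds → D_solution progresses speeds → solution progresses speeds ≠ solution_alt progresses speeds

-- ===== LEMMAS AND PROOFS =====

-- common abstract description: leading elements ≤ the group leader, and the group sizes
def takeLE (day : Int) : List Int → Nat × List Int
  | [] => (0, [])
  | x :: xs =>
    if x ≤ day then
      let r := takeLE day xs
      (r.1 + 1, r.2)
    else (0, x :: xs)

def groupsAux : Nat → List Int → List Int
  | _, [] => []
  | 0, _ :: _ => []
  | n + 1, d :: rest =>
    let r := takeLE d rest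
    ((1 + r.1 : Nat) : Int) :: groupsAux n r.2

def groups (xs : List Int) : List Int := groupsAux xs.length xs

theorem ceil_pos (x s : Int) (hs : 0 < s) :
    (if PySem.Int.mod x s = 0 then PySem.Int.floordiv x s else PySem.Int.floordiv x s + 1)
      = -(PySem.Int.floordiv (-x) s) := by
  have hd := PySem.Int.floordiv_mul_add_mod x s
  have hm0 := PySem.Int.mod_nonneg x hs
  have hms := PySem.Int.mod_lt x hs
  refine ((PySem.Int.neg_floordiv_neg_eq_iff_of_pos hs).mpr ?_).symm
  split_ifs with h
  · rw [h] at hd; constructor <;> nlinarith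
  · have hp : 0 < PySem.Int.mod x s := lt_of_le_of_ne hm0 (Ne.symm h)
    constructor <;> nlinarith

theorem ceil_all (x s : Int) (hs : s ≠ 0) :
    (if PySem.Int.mod x s = 0 then PySem.Int.floordiv x s else PySem.Int.floordiv x s + 1)
      = -(PySem.Int.floordiv (-x) s) := by
  rcases lt_or_gt_of_ne hs with hneg | hpos
  · have ht : (0:Int) < -s := by omega
    have e1 : PySem.Int.floordiv x s = PySem.Int.floordiv (-x) (-s) :=
      (PySem.Int.floordiv_neg_neg x s).symm
    have e2 : PySem.Int.mod x s = - PySem.Int.mod (-x) (-s) := by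
      rw [PySem.Int.mod_neg_neg]; ring
    have e3 : PySem.Int.floordiv (-x) s = PySem.Int.floordiv x (-s) := by
      have := PySem.Int.floordiv_neg_neg x (-s); simpa using this
    rw [e1, e2, e3]
    have h2 := ceil_pos (-x) (-s) ht
    simpa [neg_eq_zero] using h2
  · exact ceil_pos x s hpos

theorem remain_eq (progresses speeds : List Int)
    (h1 : progresses.length ≤ speeds.length)
    (h2 : ∀ t ∈ speeds.take progresses.length, t ≠ 0)
    :
    (List.range progresses.length).foldl
      (fun remain_day idx =>
        if PySem.Int.mod (100 - progresses.getD idx 0) (speeds.getD idx 0) = 0 then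
          remain_day ++ [PySem.Int.floordiv (100 - progresses.getD idx 0) (speeds.getD idx 0)]
        else
          remain_day ++ [PySem.Int.floordiv (100 - progresses.getD idx 0) (speeds.getD idx 0) + 1]) []
    = (progresses.zip speeds).map (fun ps => -(PySem.Int.floordiv (-(100 - ps.1)) ps.2)) := by
  have hbody : (fun (remain_day : List Int) idx =>
      if PySem.Int.mod (100 - progresses.getD idx 0) (speeds.getD idx 0) = 0 then
        remain_day ++ [PySem.Int.floordiv (100 - progresses.getD idx 0) (speeds.getD idx 0)]
      else
        remain_day ++ [PySem.Int.floordiv (100 - progresses.getD idx 0) (speeds.getD idx 0) + 1])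
    = fun remain_day idx => remain_day ++
        [if PySem.Int.mod (100 - progresses.getD idx 0) (speeds.getD idx 0) = 0 then
          PySem.Int.floordiv (100 - progresses.getD idx 0) (speeds.getD idx 0)
         else PySem.Int.floordiv (100 - progresses.getD idx 0) (speeds.getD idx 0) + 1] := by
    funext acc idx; split <;> rfl
  rw [hbody, PySem.List.foldl_append_singleton_eq_map, List.nil_append]
  apply List.ext_getElem
  · simp [Nat.min_eq_left h1]
  · intro i hi hi2
    have hip : i < progresses.length := by simpa using hi
    have his : i < speeds.length := lt_of_lt_of_le hip h1
    have hsne : speeds[i] ≠ 0 := by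
      refine h2 _ ?_
      have : i < (speeds.take progresses.length).length := by
        simp [Nat.min_eq_left h1]; exact hip
      exact (List.getElem_take (h := this)) ▸ List.getElem_mem this
    simp only [List.getElem_map, List.getElem_range, List.getElem_zip]
    rw [List.getD_eq_getElem _ _ hip, List.getD_eq_getElem _ _ his]
    exact ceil_all _ _ hsne

-- structural description of A's second loop on the suffix of the list
def phi (leader : Int) (b j : Nat) (ans : List Int) : List Int → List Int
  | [] => ans ++ [(j : Int) - (b : Int)]
  | x :: xs =>
    if leader < x then phi x j (j + 1) (ans ++ [(j : Int) - (b : Int)]) xs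
    else phi leader b (j + 1) ans xs

def groupsCont (leader : Int) (c : Nat) : List Int → List Int
  | [] => [(c : Int)]
  | x :: xs => if leader < x then (c : Int) :: groupsCont x 1 xs else groupsCont leader (c + 1) xs

theorem takeLE_length_le (day : Int) : ∀ xs : List Int, (takeLE day xs).2.length ≤ xs.length
  | [] => Nat.le_refl _
  | x :: xs => by
    simp only [takeLE]
    split
    · exact Nat.le_trans (takeLE_length_le day xs) (Nat.le_succ _)
    · exact Nat.le_refl _

theorem groupsAux_fuel (n : Nat) : ∀ (xs : List Int), xs.length ≤ n → groupsAux n xs = groups xs := by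
  induction n using Nat.strong_induction_on with
  | _ n ih =>
    intro xs h
    match n, xs with
    | n, [] => cases n <;> rfl
    | 0, d :: rest => simp at h
    | n + 1, d :: rest =>
      have hr : (takeLE d rest).2.length ≤ rest.length := takeLE_length_le d rest
      have hrn : rest.length ≤ n := by simpa using h
      simp only [groupsAux, groups, List.length_cons]
      rw [ih n (Nat.lt_succ_self n) _ (Nat.le_trans hr hrn)]
      exact congrArg _ (ih rest.length (by omega) _ hr).symm

theorem groups_cons (d : Int) (rest : List Int) :
    groups (d :: rest) = ((1 + (takeLE d rest).1 : Nat) : Int) :: groups (takeLE d rest).2 := by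
  simp only [groups, List.length_cons, groupsAux]
  rw [groupsAux_fuel rest.length _ (takeLE_length_le d rest),
    groupsAux_fuel (takeLE d rest).2.length _ (Nat.le_refl _)]

theorem groupsCont_eq (xs : List Int) : ∀ (leader : Int) (c : Nat),
    groupsCont leader c xs = ((c + (takeLE leader xs).1 : Nat) : Int) :: groups (takeLE leader xs).2 := by
  induction xs with
  | nil => intro leader c; simp [groupsCont, takeLE, groups, groupsAux]
  | cons x xs ih =>
    intro leader c
    by_cases h : x ≤ leader
    · have hnl : ¬ leader < x := not_lt.mpr h
      simp only [groupsCont, takeLE, if_pos h, if_neg hnl]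
      rw [ih leader (c + 1)]
      have : c + 1 + (takeLE leader xs).1 = c + ((takeLE leader xs).1 + 1) := by omega
      rw [this]
    · have hl : leader < x := lt_of_not_ge h
      simp only [groupsCont, takeLE, if_pos hl, if_neg h]
      rw [ih x 1, groups_cons]
      simp

theorem phi_eq (xs : List Int) : ∀ (leader : Int) (b j : Nat) (ans : List Int), b ≤ j →
    phi leader b j ans xs = ans ++ groupsCont leader (j - b) xs := by
  induction xs with
  | nil =>
    intro leader b j ans hbj
    simp only [phi, groupsCont]
    rw [Nat.cast_sub hbj]
  | cons x xs ih =>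
    intro leader b j ans hbj
    simp only [phi, groupsCont]
    split
    · rw [ih x j (j + 1) _ (Nat.le_refl _ |>.trans (Nat.le_succ j))]
      simp [List.append_assoc, Nat.cast_sub hbj]
    · rw [ih leader b (j + 1) ans (Nat.le_succ_of_le hbj)]
      have : j + 1 - b = (j - b) + 1 := by omega
      rw [this]

theorem loopA (L : List Int) : ∀ (xs : List Int) (j b : Nat) (ans : List Int),
    j ≤ L.length → L.drop j = xs →
    (let r := List.foldl
        (fun (st : List Int × Nat) i =>
          if L.getD st.2 0 < L.getD i 0 then (st.1 ++ [(i : Int) - (st.2 : Int)], i) else st)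
        (ans, b) (List.range' j xs.length);
      r.1 ++ [(L.length : Int) - (r.2 : Int)]) = phi (L.getD b 0) b j ans xs := by
  intro xs
  induction xs with
  | nil =>
    intro j b ans hj hd
    have hlen : L.length ≤ j := List.drop_eq_nil_iff.mp hd
    have : j = L.length := le_antisymm hj hlen
    simp [phi, this]
  | cons x t ih =>
    intro j b ans hj hd
    have hx : L[j]? = some x := by
      have h0 : (L.drop j)[0]? = some x := by rw [hd]; rfl
      rw [List.getElem?_drop] at h0
      simpa using h0
    have hxgd : L.getD j 0 = x := by
      simp [List.getD, hx]
    have hjlt : j < L.length := by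
      by_contra hc
      have : L.drop j = [] := List.drop_eq_nil_iff.mpr (by omega)
      simp [this] at hd
    have hdt : L.drop (j + 1) = t := by
      have : List.drop 1 (L.drop j) = L.drop (j + 1) := by
        rw [List.drop_drop]
      rw [← this, hd]; rfl
    simp only [List.length_cons, List.range'_succ, List.foldl_cons]
    by_cases hlt : L.getD b 0 < L.getD j 0
    · rw [if_pos hlt]
      have := ih (j + 1) j (ans ++ [(j : Int) - (b : Int)]) (by omega) hdt
      simp only at this
      have hlt' : L.getD b 0 < x := hxgd ▸ hlt
      rw [this, hxgd]
      simp only [phi]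
      rw [if_pos hlt']
    · rw [if_neg hlt]
      have := ih (j + 1) b ans (by omega) hdt
      simp only at this
      rw [this]
      have hnlt : ¬ L.getD b 0 < x := hxgd ▸ hlt
      simp only [phi, if_neg hnlt]

theorem partB (L : List Int) (hL : L ≠ []) :
    (let st := (List.range L.length).foldl
        (fun (st : List Int × Nat) i =>
          if L.getD st.2 0 < L.getD i 0 then (st.1 ++ [(i : Int) - (st.2 : Int)], i) else st)
        (([] : List Int), 0);
      st.1 ++ [(L.length : Int) - (st.2 : Int)]) = groups L := by
  cases L with
  | nil => exact absurd rfl hL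
  | cons d rest =>
    have h0 := loopA (d :: rest) (d :: rest) 0 0 [] (Nat.zero_le _) (by simp)
    rw [List.range_eq_range']
    simp only at h0
    rw [h0]
    have hgd : (d :: rest).getD 0 0 = d := rfl
    rw [hgd]
    simp only [phi, lt_irrefl]
    rw [phi_eq rest d 0 1 [] (Nat.zero_le 1)]
    simp only [List.nil_append]
    rw [groupsCont_eq, groups_cons]
    norm_num

-- ===== B-side lemmas: prefix maximum and run-length encoding =====

-- prefix maximum of the tail, given the maximum so far
def pmax (m : Int) : List Int → List Int
  | [] => []
  | x :: xs => (if x > m then x else m) :: pmax (if x > m then x else m) xs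

-- run-length encoding continued inside a run of value `prev` counted `c` so far
def rrun (prev : Int) (c : Int) : List Int → List Int
  | [] => [c]
  | d :: t => if prev = d then rrun prev (c + 1) t else c :: rrun d 1 t

def shipStep (acc : List Int) (d : Int) : List Int :=
  acc ++ [if acc.isEmpty ∨ d > acc.getLastD 0 then d else acc.getLastD 0]

def rleStep (st : List Int × Option Int) (d : Int) : List Int × Option Int :=
  if st.2 = some d then (st.1.dropLast ++ [st.1.getLastD 0 + 1], st.2)
  else (st.1 ++ [(1 : Int)], some d)

theorem shipFold (ds : List Int) : ∀ (acc : List Int) (m : Int), acc.getLast? = some m →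
    ds.foldl shipStep acc = acc ++ pmax m ds := by
  induction ds with
  | nil => intro acc m h; simp [pmax]
  | cons x xs ih =>
    intro acc m h
    have hne : acc ≠ [] := by intro e; rw [e] at h; simp at h
    have hlast : acc.getLastD 0 = m := by rw [List.getLastD_eq_getLast?, h]; rfl
    have hemp : acc.isEmpty = false := by simpa [List.isEmpty_iff] using hne
    have hstep : shipStep acc x = acc ++ [if x > m then x else m] := by
      simp only [shipStep, hemp, hlast]
      split_ifs with h1 h2 <;> simp_all
    simp only [List.foldl_cons, hstep]
    rw [ih (acc ++ [if x > m then x else m]) (if x > m then x else m) (by simp)]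
    simp [pmax]

theorem ship_eq (ds : List Int) :
    ds.foldl shipStep [] = match ds with | [] => ([] : List Int) | d :: t => d :: pmax d t := by
  cases ds with
  | nil => rfl
  | cons d t =>
    have h0 : shipStep [] d = [d] := by simp [shipStep]
    simp only [List.foldl_cons, h0]
    rw [shipFold t [d] d (by rfl)]
    rfl

theorem rleFold (ds : List Int) : ∀ (ans : List Int) (c : Int) (prev : Int),
    (ds.foldl rleStep (ans ++ [c], some prev)).1 = ans ++ rrun prev c ds := by
  induction ds with
  | nil => intro ans c prev; simp [rrun]
  | cons d t ih =>
    intro ans c prev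
    by_cases h : prev = d
    · have hstep : rleStep (ans ++ [c], some prev) d = (ans ++ [c + 1], some prev) := by
        simp [rleStep, h]
      simp only [List.foldl_cons, hstep]
      rw [ih ans (c + 1) prev]
      simp [rrun, h]
    · have hstep : rleStep (ans ++ [c], some prev) d = ((ans ++ [c]) ++ [1], some d) := by
        simp [rleStep, h]
      simp only [List.foldl_cons, hstep]
      rw [ih (ans ++ [c]) 1 d]
      simp [rrun, h]

theorem rrun_pmax : ∀ (t : List Int) (leader : Int) (c : Int),
    rrun leader c (pmax leader t)
      = (c + ((takeLE leader t).1 : Int)) :: groups (takeLE leader t).2 := by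
  intro t
  induction t with
  | nil => intro leader c; simp [pmax, rrun, takeLE, groups, groupsAux]
  | cons x xs ih =>
    intro leader c
    by_cases h : x ≤ leader
    · have hng : ¬ x > leader := not_lt.mpr h
      simp only [pmax, if_neg hng, takeLE, if_pos h]
      simp only [rrun]
      rw [ih leader (c + 1)]
      have : c + 1 + ((takeLE leader xs).1 : Int)
          = c + (((takeLE leader xs).1 + 1 : Nat) : Int) := by push_cast; ring
      rw [this]
      simp
    · have hg : x > leader := lt_of_not_ge h
      have hne : leader ≠ x := ne_of_lt hg
      simp only [pmax, if_pos hg, takeLE, if_neg h]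
      simp only [rrun, if_neg hne]
      rw [ih x 1, groups_cons]
      push_cast
      simp

theorem alt_groups (d : Int) (t : List Int) :
    ((d :: pmax d t).foldl rleStep (([] : List Int), (none : Option Int))).1 = groups (d :: t) := by
  have h0 : rleStep (([] : List Int), (none : Option Int)) d = (([] : List Int) ++ [(1:Int)], some d) := by
    simp [rleStep]
  rw [List.foldl_cons, h0, rleFold, rrun_pmax, groups_cons]
  push_cast
  simp

-- ===== VERDICT (by name: the statement is the Claim_ definition above) =====
theorem solution_spec : Claim_unchanged_solution := by
  intro p s _ hpre hnD
  obtain ⟨h1, h2⟩ := hpre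
  show solution p s = solution_alt p s
  have hzne : p.zip s ≠ [] := by
    intro hnil
    apply hnD
    have := congrArg List.length hnil
    simp [Nat.min_eq_left h1] at this
    exact this
  simp only [solution, solution_alt]
  rw [remain_eq p s h1 h2]
  have hfold : (p.zip s).foldl
      (fun ship_days ps =>
        let d := -(PySem.Int.floordiv (-(100 - ps.1)) ps.2)
        ship_days ++ [if ship_days.isEmpty ∨ d > ship_days.getLastD 0 then d
                      else ship_days.getLastD 0]) []
      = ((p.zip s).map (fun ps => -(PySem.Int.floordiv (-(100 - ps.1)) ps.2))).foldl shipStep [] := by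
    rw [List.foldl_map]
    rfl
  rw [hfold, ship_eq]
  have hmne : (p.zip s).map (fun ps => -(PySem.Int.floordiv (-(100 - ps.1)) ps.2)) ≠ [] := by
    simpa using hzne
  obtain ⟨r, rs, hz⟩ := List.exists_cons_of_ne_nil hmne
  rw [hz]
  have hm : (match r :: rs with | [] => ([] : List Int) | d :: t => d :: pmax d t)
      = r :: pmax r rs := rfl
  rw [hm]
  have hb : (List.foldl
      (fun (st : List Int × Option Int) d =>
        if st.2 = some d then (st.1.dropLast ++ [st.1.getLastD 0 + 1], st.2)
        else (st.1 ++ [(1 : Int)], some d))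
      (([] : List Int), (none : Option Int)) (r :: pmax r rs)).1 = groups (r :: rs) :=
    alt_groups r rs
  rw [hb]
  have hp2 := partB (r :: rs) (by simp)
  simp only at hp2
  exact hp2

theorem solution_changed : Claim_changed_solution := by
  unfold Claim_changed_solution; decide

theorem solution_tight : Claim_exact_solution := by
  intro p s _ _ hD
  have hp : p = [] := hD
  subst hp
  simp [solution, solution_alt]
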